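-- pv_equiv track=rewrite | github.com/Vlad-Shcherbina/Morph-Endo-Legacy | src/dna_basics.py | nat
-- ===== SOURCE A (Python) =====
-- def nat(dna):
--     result = 0
--     power = 1
--     for base in dna:
--         if base == 'P':
--             yield result
--             result = 0
--             power = 1
--             continue
--         elif base == 'C':
--             result += power
--         power *= 2
-- ===== SOURCE B (Python) =====
-- def nat(dna):
--     for frag in dna.split('P')[:-1]:
--         yield sum(1 << i for i, c in enumerate(frag) if c == 'C')
-- ===== Notes on version B (the rewrite author's own statement) =====
-- stated objective: alternative
-- what changed: Replaces the single-pass running accumulator/power loop by a group-first decomposition: split the string on 'P', drop the trailing fragment (never yielded by A), and convert each remaining fragment independently as an LSB-first binary number with 'C' = 1.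
import Mathlib
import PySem

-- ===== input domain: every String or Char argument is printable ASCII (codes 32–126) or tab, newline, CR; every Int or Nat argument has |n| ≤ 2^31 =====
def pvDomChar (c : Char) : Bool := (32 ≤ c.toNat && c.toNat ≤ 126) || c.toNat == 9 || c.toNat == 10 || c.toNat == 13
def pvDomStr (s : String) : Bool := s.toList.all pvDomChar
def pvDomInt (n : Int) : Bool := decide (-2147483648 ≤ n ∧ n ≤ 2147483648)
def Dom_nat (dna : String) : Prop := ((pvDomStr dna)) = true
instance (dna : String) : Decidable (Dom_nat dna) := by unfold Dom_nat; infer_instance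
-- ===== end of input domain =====

-- B replaces A's single-pass accumulator/power loop by split-on-'P' (dropping the trailing
-- fragment, which A never yields) and an independent LSB-first conversion of each fragment.

-- ===== PORT A =====
-- the generator's yields are collected in order into the output list (state: out, result, power)
def nat (dna : String) : List Int :=
  (dna.toList.foldl
    (fun (st : List Int × Int × Int) base =>
      if base = 'P' then (st.1 ++ [st.2.1], 0, 1)
      else if base = 'C' then (st.1, st.2.1 + st.2.2, st.2.2 * 2)
      else (st.1, st.2.1, st.2.2 * 2))
    ([], 0, 1)).1

-- ===== PORT B =====
-- sum(1 << i for i, c in enumerate(frag) if c == 'C'); enumerate indices are ≥ 0 so .toNat is exact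
def fragVal (frag : List Char) : Int :=
  (PySem.List.enumerate frag).foldl
    (fun acc ic => if ic.2 = 'C' then acc + 2 ^ ic.1.toNat else acc) 0

-- dna.split('P') with a one-char separator is exactly List.splitOn 'P'; [:-1] is dropLast
def nat_alt (dna : String) : List Int :=
  ((List.splitOn 'P' dna.toList).dropLast).map fragVal

-- ===== PRECONDITION & SPEC =====
def Spec_nat (dna : String) (out : List Int) : Prop := out = nat_alt dna
instance (dna : String) (out : List Int) : Decidable (Spec_nat dna out) := by unfold Spec_nat; infer_instance

-- ===== CLAIM (what is proved, stated in full; the proofs are below) =====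
def Claim_equal_nat : Prop := ∀ (dna : String), Dom_nat dna → Spec_nat dna (nat dna)

-- ===== LEMMAS AND PROOFS =====

-- the step function of A's loop, named for the proofs
def natStep (st : List Int × Int × Int) (base : Char) : List Int × Int × Int :=
  if base = 'P' then (st.1 ++ [st.2.1], 0, 1)
  else if base = 'C' then (st.1, st.2.1 + st.2.2, st.2.2 * 2)
  else (st.1, st.2.1, st.2.2 * 2)

-- the numbers A yields while consuming l, given the partial fragment pref already consumed
def yields (pref : List Char) : List Char → List Int
  | [] => []
  | c :: t => if c = 'P' then fragVal pref :: yields [] t else yields (pref ++ [c]) t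

theorem fragVal_append_singleton (pref : List Char) (c : Char) :
    fragVal (pref ++ [c]) = fragVal pref + (if c = 'C' then 2 ^ pref.length else 0) := by
  simp only [fragVal, PySem.List.enumerate_append, List.foldl_append,
    PySem.List.enumerate_cons, PySem.List.enumerate_nil, List.foldl_cons, List.foldl_nil]
  split_ifs <;> simp

theorem foldl_natStep (l : List Char) :
    ∀ (pref : List Char) (out : List Int),
      (l.foldl natStep (out, fragVal pref, 2 ^ pref.length)).1 = out ++ yields pref l := by
  induction l with
  | nil => intro pref out; simp [yields]
  | cons c t ih =>
    intro pref out
    by_cases hP : c = 'P'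
    · subst hP
      have h0 : fragVal ([] : List Char) = 0 := rfl
      have := ih [] (out ++ [fragVal pref])
      simp only [List.foldl_cons, natStep] at *
      simpa [yields, h0] using this
    · by_cases hC : c = 'C'
      · subst hC
        have := ih (pref ++ ['C']) out
        simp only [List.foldl_cons, natStep] at *
        rw [fragVal_append_singleton] at this
        simpa [yields, pow_succ, mul_comm] using this
      · have := ih (pref ++ [c]) out
        simp only [List.foldl_cons, natStep, if_neg hP, if_neg hC] at *
        rw [fragVal_append_singleton, if_neg hC, add_zero] at this
        simpa [yields, hP, pow_succ, mul_comm] using this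

theorem modifyHead_modifyHead' {α : Type} (f g : α → α) (l : List α) :
    List.modifyHead f (List.modifyHead g l) = List.modifyHead (fun x => f (g x)) l := by
  cases l <;> simp

theorem yields_eq (l : List Char) :
    ∀ pref : List Char,
      yields pref l = ((List.splitOn 'P' l).modifyHead (pref ++ ·)).dropLast.map fragVal := by
  induction l with
  | nil => intro pref; simp [yields, List.splitOn, List.splitOnP_nil]
  | cons c t ih =>
    intro pref
    by_cases hP : c = 'P'
    · subst hP
      simp only [yields, List.splitOn, List.splitOnP_cons, beq_self_eq_true]
      rw [ih []]
      have hne : List.splitOnP (· == 'P') t ≠ [] := List.splitOnP_ne_nil _ t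
      obtain ⟨h0, rest, hrest⟩ := List.exists_cons_of_ne_nil hne
      simp [List.splitOn, hrest, List.modifyHead]
    · simp only [yields, List.splitOn, List.splitOnP_cons, beq_iff_eq, if_neg hP]
      rw [ih (pref ++ [c]), List.splitOn, modifyHead_modifyHead']
      have he : (fun x => (pref ++ [c]) ++ x) = (fun x => pref ++ c :: x) :=
        funext fun x => by simp
      rw [he]

-- ===== VERDICT (by name: the statement is the Claim_ definition above) =====
theorem nat_spec : Claim_equal_nat := by
  intro dna _
  unfold Spec_nat nat nat_alt
  have hfold := foldl_natStep dna.toList [] []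
  rw [yields_eq dna.toList []] at hfold
  simp only [show fragVal [] = 0 from rfl, List.length_nil, pow_zero, List.nil_append] at hfold
  have hmod : List.modifyHead (fun x : List Char => x) (List.splitOn 'P' dna.toList)
      = List.splitOn 'P' dna.toList := by
    cases List.splitOn 'P' dna.toList <;> rfl
  rw [hmod] at hfold
  exact hfold
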